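-- pv_equiv track=rewrite | github.com/pabloojp/Big-Data-en-paralelo | Entrega1.py | ternaPitagorica
-- ===== SOURCE A (Python) =====
-- from typing import Type, Tuple
--
-- def ternaPitagorica(lista : list) -> Tuple:
--     longitud = len(lista)
--     ultima_tupla_add = lista[longitud - 1]
--     ultimo_elemento = ultima_tupla_add[0]
--     for i in range(longitud - 1):
--         for j in range(i + 1, longitud-1):
--             prim = lista[i]
--             seg = lista[j]
--             if (prim[0]**2 + seg[0]**2 == ultimo_elemento**2) or (seg[0]**2 + ultimo_elemento**2 == prim[0]**2 ) or (prim[0]**2 + ultimo_elemento**2 == seg[0]**2 ):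
--                 result = [prim, seg, ultima_tupla_add]
--                 return (result, True)
--     return ([], False)
-- ===== SOURCE B (Python) =====
-- def ternaPitagorica(lista):
--     last = lista[-1]
--     c2 = last[0] ** 2
--     n1 = len(lista) - 1
--     pos = {}  # square value -> ascending list of indices < n1
--     for idx in range(n1):
--         pos.setdefault(lista[idx][0] ** 2, []).append(idx)
--     for i in range(n1):
--         a2 = lista[i][0] ** 2
--         best = None
--         for t in (c2 - a2, a2 - c2, a2 + c2):
--             for p in pos.get(t, []):
--                 if p > i:
--                     if best is None or p < best:
--                         best = p
--                     break
--         if best is not None: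
--             return ([lista[i], lista[best], last], True)
--     return ([], False)
-- ===== Notes on version B (the rewrite author's own statement) =====
-- stated objective: faster
-- what changed: Replaces the O(n^2) scan over all index pairs by a precomputed hash index from squared head values to their ascending index lists, so that for each i only the (at most three) target squares c2-a2, a2-c2, a2+c2 are looked up and the first position > i is taken.
-- outside the precondition, e.g. on ternaPitagorica([(3,), (4,), (), (5,)]): A returns ([(3,), (4,), (5,)], True), B raises IndexError
import Mathlib
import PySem

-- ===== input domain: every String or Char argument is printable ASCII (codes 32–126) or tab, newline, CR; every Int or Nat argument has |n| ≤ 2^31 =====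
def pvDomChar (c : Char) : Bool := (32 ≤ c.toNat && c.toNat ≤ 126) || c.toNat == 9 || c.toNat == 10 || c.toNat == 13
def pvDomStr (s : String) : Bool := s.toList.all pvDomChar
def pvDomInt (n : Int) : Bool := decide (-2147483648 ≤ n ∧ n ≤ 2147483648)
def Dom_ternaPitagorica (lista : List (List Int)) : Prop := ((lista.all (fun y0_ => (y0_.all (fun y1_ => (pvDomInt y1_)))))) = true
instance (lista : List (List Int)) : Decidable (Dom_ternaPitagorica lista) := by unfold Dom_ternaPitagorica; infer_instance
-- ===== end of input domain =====

-- B replaces A's scan over all index pairs by a precomputed index from squared head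
-- values to their ascending position lists, looking up only the three target squares
-- per i; return values proved equal on Pre_.

-- shared indexing helpers (Python lista[i] and t[0]; total via defaults, which the
-- Python never reaches on inputs admitted by Pre_)
def pvAt (lista : List (List Int)) (i : Int) : List Int := (PySem.List.pyGet? lista i).getD []
def pvHead (l : List Int) : Int := (PySem.List.pyGet? l 0).getD 0

-- ===== PORT A =====
def pvA_inner (lista : List (List Int)) (ult : List Int) (c i : Int) :
    List Int → Option (List (List Int) × Bool)
  | [] => none
  | j :: js =>
      let prim := pvAt lista i
      let seg := pvAt lista j
      if pvHead prim ^ 2 + pvHead seg ^ 2 == c ^ 2 || pvHead seg ^ 2 + c ^ 2 == pvHead prim ^ 2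
           || pvHead prim ^ 2 + c ^ 2 == pvHead seg ^ 2
      then some ([prim, seg, ult], true)
      else pvA_inner lista ult c i js

def pvA_outer (lista : List (List Int)) (ult : List Int) (c n : Int) :
    List Int → Option (List (List Int) × Bool)
  | [] => none
  | i :: is =>
      match pvA_inner lista ult c i (PySem.List.pyRange (i + 1) (n - 1) 1) with
      | some r => some r
      | none => pvA_outer lista ult c n is

def ternaPitagorica (lista : List (List Int)) : List (List Int) × Bool :=
  let n : Int := PySem.List.len lista
  let ult := pvAt lista (n - 1)
  let c := pvHead ult
  (pvA_outer lista ult c n (PySem.List.pyRange 0 (n - 1) 1)).getD ([], false)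

-- ===== PORT B =====
def pvB_sq (lista : List (List Int)) (i : Int) : Int := pvHead (pvAt lista i) ^ 2

-- pos.setdefault(lista[idx][0]**2, []).append(idx)
def pvB_index (lista : List (List Int)) (n1 : Int) : PySem.Dict Int (List Int) :=
  (PySem.List.pyRange 0 n1 1).foldl
    (fun d idx => d.modify (pvB_sq lista idx) [] (· ++ [idx])) PySem.Dict.empty

-- first p in ps with p > i (Python: linear scan with break; ps is ascending)
def pvB_firstGt (ps : List Int) (i : Int) : Option Int := ps.find? (fun p => i < p)

-- 'if best is None or p < best: best = p'
def pvB_merge (best cand : Option Int) : Option Int :=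
  match cand with
  | none => best
  | some p =>
      match best with
      | none => some p
      | some b => if p < b then some p else some b

def pvB_best (d : PySem.Dict Int (List Int)) (i c2 a2 : Int) : Option Int :=
  [c2 - a2, a2 - c2, a2 + c2].foldl
    (fun best t => pvB_merge best (pvB_firstGt (d.getD t []) i)) none

def pvB_loop (lista : List (List Int)) (last : List Int) (c2 : Int)
    (d : PySem.Dict Int (List Int)) : List Int → Option (List (List Int) × Bool)
  | [] => none
  | i :: is =>
      match pvB_best d i c2 (pvB_sq lista i) with
      | some j => some ([pvAt lista i, pvAt lista j, last], true)
      | none => pvB_loop lista last c2 d is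

def ternaPitagorica_alt (lista : List (List Int)) : List (List Int) × Bool :=
  let last := (PySem.List.pyGet? lista (-1)).getD []
  let c2 := pvHead last ^ 2
  let n1 := PySem.List.len lista - 1
  let d := pvB_index lista n1
  (pvB_loop lista last c2 d (PySem.List.pyRange 0 n1 1)).getD ([], false)

-- ===== PRECONDITION & SPEC =====
-- Pre_ excludes the empty list (A raises IndexError on lista[-1]) and lists containing
-- an empty inner list: there A raises IndexError on t[0] — or, when a triple is found
-- before A's scan reaches the empty element, B's eager index construction raises instead.
def Pre_ternaPitagorica (lista : List (List Int)) : Prop :=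
  lista ≠ [] ∧ ∀ x ∈ lista, x ≠ []
instance (lista : List (List Int)) : Decidable (Pre_ternaPitagorica lista) := by
  unfold Pre_ternaPitagorica; infer_instance

def pvWitness_ternaPitagorica : List (List Int) := [[3], [4], [5]]

def Spec_ternaPitagorica (lista : List (List Int)) (out : List (List Int) × Bool) : Prop :=
  out = ternaPitagorica_alt lista
instance (lista : List (List Int)) (out : List (List Int) × Bool) :
    Decidable (Spec_ternaPitagorica lista out) := by unfold Spec_ternaPitagorica; infer_instance

-- ===== CLAIM (what is proved, stated in full; the proofs are below) =====
def Claim_equal_ternaPitagorica : Prop :=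
  ∀ (lista : List (List Int)), Dom_ternaPitagorica lista → Pre_ternaPitagorica lista →
    Spec_ternaPitagorica lista (ternaPitagorica lista)

-- ===== LEMMAS AND PROOFS =====

-- A's inner loop is a find? over its range
theorem pvA_inner_eq_find (lista : List (List Int)) (ult : List Int) (c i : Int)
    (js : List Int) :
    pvA_inner lista ult c i js =
      (js.find? (fun j =>
          pvB_sq lista i + pvB_sq lista j == c ^ 2 ||
            pvB_sq lista j + c ^ 2 == pvB_sq lista i ||
            pvB_sq lista i + c ^ 2 == pvB_sq lista j)).map
        (fun j => ([pvAt lista i, pvAt lista j, ult], true)) := by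
  induction js with
  | nil => rfl
  | cons j js ih =>
      simp only [pvA_inner]
      by_cases h : (pvHead (pvAt lista i) ^ 2 + pvHead (pvAt lista j) ^ 2 == c ^ 2 ||
          pvHead (pvAt lista j) ^ 2 + c ^ 2 == pvHead (pvAt lista i) ^ 2 ||
          pvHead (pvAt lista i) ^ 2 + c ^ 2 == pvHead (pvAt lista j) ^ 2) = true
      · rw [if_pos h, List.find?_cons_of_pos (p := fun j =>
            pvB_sq lista i + pvB_sq lista j == c ^ 2 ||
              pvB_sq lista j + c ^ 2 == pvB_sq lista i ||
              pvB_sq lista i + c ^ 2 == pvB_sq lista j) (by simpa [pvB_sq] using h)]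
        rfl
      · rw [if_neg h, List.find?_cons_of_neg (p := fun j =>
            pvB_sq lista i + pvB_sq lista j == c ^ 2 ||
              pvB_sq lista j + c ^ 2 == pvB_sq lista i ||
              pvB_sq lista i + c ^ 2 == pvB_sq lista j) (by simpa [pvB_sq] using h)]
        exact ih

-- find? only depends on the predicate's values on the list
theorem pvFind?_congr (l : List Int) (p q : Int → Bool) (h : ∀ x ∈ l, p x = q x) :
    l.find? p = l.find? q := by
  induction l with
  | nil => rfl
  | cons x xs ih =>
      have hx := h x (List.mem_cons_self)
      by_cases hq : q x = true
      · rw [List.find?_cons_of_pos (hx ▸ hq), List.find?_cons_of_pos hq]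
      · rw [List.find?_cons_of_neg (by rw [hx]; exact hq), List.find?_cons_of_neg hq]
        exact ih fun x hx => h x (List.mem_cons_of_mem _ hx)

-- the index lists the positions of each square, in order
theorem pvB_index_getD (lista : List (List Int)) (n1 t : Int) :
    (pvB_index lista n1).getD t [] =
      (PySem.List.pyRange 0 n1 1).filter (fun j => pvB_sq lista j == t) := by
  have h := PySem.Dict.getD_foldl_modify_append
    (l := (PySem.List.pyRange 0 n1 1).map (fun j => (pvB_sq lista j, j)))
    (d := PySem.Dict.empty) (c := t)
  rw [List.foldl_map] at h
  unfold pvB_index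
  simp only [List.filter_map, List.map_map] at h
  simpa [Function.comp_def] using h

@[simp] theorem pvB_merge_none (c : Option Int) : pvB_merge none c = c := by
  cases c <;> rfl

-- merging two find?s over a strictly ascending list is find? of the disjunction
theorem pvB_merge_find (L : List Int) (hL : L.Pairwise (· < ·)) (p q : Int → Bool) :
    pvB_merge (L.find? p) (L.find? q) = L.find? (fun x => p x || q x) := by
  induction L with
  | nil => rfl
  | cons x xs ih =>
      have hx : ∀ b ∈ xs, x < b := (List.pairwise_cons.mp hL).1
      have hxs := (List.pairwise_cons.mp hL).2
      by_cases hp : p x = true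
      · rw [List.find?_cons_of_pos hp,
          List.find?_cons_of_pos (p := fun x => p x || q x) (by simp [hp])]
        by_cases hq : q x = true
        · rw [List.find?_cons_of_pos hq]; simp [pvB_merge]
        · rw [List.find?_cons_of_neg hq]
          cases hf : xs.find? q with
          | none => rfl
          | some b =>
              have hb : x < b := hx b (List.mem_of_find?_eq_some hf)
              simp [pvB_merge, show ¬ b < x by omega]
      · by_cases hq : q x = true
        · rw [List.find?_cons_of_neg hp, List.find?_cons_of_pos hq,
            List.find?_cons_of_pos (p := fun x => p x || q x) (by simp [hq])]
          cases hf : xs.find? p with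
          | none => rfl
          | some a =>
              have ha : x < a := hx a (List.mem_of_find?_eq_some hf)
              simp [pvB_merge, ha]
        · rw [List.find?_cons_of_neg hp, List.find?_cons_of_neg hq,
            List.find?_cons_of_neg (p := fun x => p x || q x) (by simp [hp, hq])]
          exact ih hxs

-- restricting find? on range(0,n1) by 'i < j' is find? on range(i+1,n1)
theorem pvFind?_range_tail (n1 i : Int) (hi : 0 ≤ i) (C : Int → Bool) :
    (PySem.List.pyRange 0 n1 1).find? (fun j => decide (i < j) && C j) =
      (PySem.List.pyRange (i + 1) n1 1).find? C := by
  by_cases hle : i + 1 ≤ n1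
  · rw [PySem.List.pyRange_one_append 0 (i + 1) n1 (by omega) hle, List.find?_append]
    have h1 : (PySem.List.pyRange 0 (i + 1) 1).find? (fun j => decide (i < j) && C j) = none := by
      rw [List.find?_eq_none]
      intro x hx
      have := PySem.List.mem_pyRange_one.mp hx
      simp [show ¬ i < x by omega]
    rw [h1, Option.none_or]
    apply pvFind?_congr
    intro x hx
    have := PySem.List.mem_pyRange_one.mp hx
    simp [show i < x by omega]
  · rw [PySem.List.pyRange_one_eq_nil (a := i + 1) (b := n1) (by omega),
      show List.find? C [] = none from rfl, List.find?_eq_none]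
    intro x hx
    have := PySem.List.mem_pyRange_one.mp hx
    simp [show ¬ i < x by omega]

-- lista[len(lista)-1] is lista[-1]
theorem pvLast_eq (lista : List (List Int)) :
    pvAt lista ((PySem.List.len lista) - 1) = (PySem.List.pyGet? lista (-1)).getD [] := by
  unfold pvAt
  rw [PySem.List.len_eq]
  cases lista with
  | nil => rfl
  | cons a as =>
      have h0 : (0 : Int) ≤ ((a :: as).length : Int) - 1 := by
        simp only [List.length_cons]; omega
      rw [PySem.List.pyGet?_neg_one, List.getLast?_eq_getElem?,
        PySem.List.pyGet?_of_nonneg _ h0]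
      have h1 : ((((a :: as).length : Int)) - 1).toNat = (a :: as).length - 1 := by
        simp only [List.length_cons]; omega
      rw [h1]

-- per index i: B's three lookups find exactly what A's inner scan finds
theorem pvBest_eq_inner (lista : List (List Int)) (c n1 i : Int) (hi : 0 ≤ i) :
    pvB_best (pvB_index lista n1) i (c ^ 2) (pvB_sq lista i) =
      (PySem.List.pyRange (i + 1) n1 1).find? (fun j =>
        pvB_sq lista i + pvB_sq lista j == c ^ 2 ||
          pvB_sq lista j + c ^ 2 == pvB_sq lista i ||
          pvB_sq lista i + c ^ 2 == pvB_sq lista j) := by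
  have hF : ∀ t : Int, pvB_firstGt ((pvB_index lista n1).getD t []) i =
      (PySem.List.pyRange 0 n1 1).find? (fun a => decide (i < a) && (pvB_sq lista a == t)) := by
    intro t
    rw [pvB_index_getD, pvB_firstGt, List.find?_filter]
    apply pvFind?_congr
    intro x _
    by_cases h1 : i < x <;> by_cases h2 : pvB_sq lista x = t <;> simp [h1, h2]
  have hpair := PySem.List.pairwise_lt_pyRange_one (a := 0) (b := n1)
  set a2 := pvB_sq lista i with ha2
  set c2 := c ^ 2 with hc2
  have hunf : pvB_best (pvB_index lista n1) i c2 a2 =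
      pvB_merge (pvB_merge (pvB_merge none
          (pvB_firstGt ((pvB_index lista n1).getD (c2 - a2) []) i))
          (pvB_firstGt ((pvB_index lista n1).getD (a2 - c2) []) i))
          (pvB_firstGt ((pvB_index lista n1).getD (a2 + c2) []) i) := rfl
  rw [hunf, pvB_merge_none, hF, hF, hF, pvB_merge_find _ hpair, pvB_merge_find _ hpair]
  rw [show (fun x => (decide (i < x) && (pvB_sq lista x == c2 - a2) ||
        decide (i < x) && (pvB_sq lista x == a2 - c2)) ||
        decide (i < x) && (pvB_sq lista x == a2 + c2)) =
      (fun j => decide (i < j) && (a2 + pvB_sq lista j == c2 ||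
        pvB_sq lista j + c2 == a2 || a2 + c2 == pvB_sq lista j)) from ?_]
  · exact pvFind?_range_tail n1 i hi _
  · funext x
    by_cases h : i < x
    · simp only [h, decide_true, Bool.true_and]
      rw [Bool.eq_iff_iff]
      simp only [Bool.or_eq_true, beq_iff_eq]
      generalize pvB_sq lista x = s
      omega
    · simp [h]

-- the outer loops agree pointwise on any list of nonnegative indices
theorem pvLoops_eq (lista : List (List Int)) (last : List Int) (c n n1 : Int)
    (hn : n = (lista.length : Int)) (hn1 : n1 = n - 1) :
    ∀ is : List Int, (∀ i ∈ is, 0 ≤ i) →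
      pvA_outer lista last c n is = pvB_loop lista last (c ^ 2) (pvB_index lista n1) is := by
  intro is
  induction is with
  | nil => intro _; rfl
  | cons i is ih =>
      intro hpos
      have hi : 0 ≤ i := hpos i (List.mem_cons_self)
      have hkey := pvBest_eq_inner lista c n1 i hi
      simp only [pvA_outer, pvB_loop]
      rw [show n - 1 = n1 from by omega, pvA_inner_eq_find, ← hkey]
      cases pvB_best (pvB_index lista n1) i (c ^ 2) (pvB_sq lista i) with
      | none => exact ih fun x hx => hpos x (List.mem_cons_of_mem _ hx)
      | some j => rfl

-- ===== VERDICT (by name: the statement is the Claim_ definition above) =====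
theorem ternaPitagorica_spec : Claim_equal_ternaPitagorica := by
  intro lista _ _
  unfold Spec_ternaPitagorica ternaPitagorica ternaPitagorica_alt
  simp only []
  rw [← pvLast_eq]
  rw [show pvHead (pvAt lista (PySem.List.len lista - 1)) ^ 2 =
      pvHead (pvAt lista (PySem.List.len lista - 1)) ^ 2 from rfl]
  rw [pvLoops_eq lista (pvAt lista (PySem.List.len lista - 1))
      (pvHead (pvAt lista (PySem.List.len lista - 1)))
      (PySem.List.len lista) (PySem.List.len lista - 1)
      (by simp [PySem.List.len_eq]) rfl
      (PySem.List.pyRange 0 (PySem.List.len lista - 1) 1)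
      (fun x hx => (PySem.List.mem_pyRange_one.mp hx).1)]
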